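-- pv_equiv track=rewrite | github.com/annwfsly/DataMiningHomework2 | homework2.py | generate_candi
-- ===== SOURCE A (Python) =====
-- def generate_candi(dataset):
--     cand_1 = []
--     for transac in dataset:
--         for item in transac:
--             if [item] not in cand_1:
--                 cand_1.append([item])
--     cand_1.sort()
--     return [frozenset(var) for var in cand_1]
-- ===== SOURCE B (Python) =====
-- def generate_candi(dataset):
--     # sort-then-adjacent-dedup instead of repeated list membership scans
--     items = sorted([item for transac in dataset for item in transac])
--     uniq = []
--     prev = None
--     for item in items:
--         if prev is None or item != prev:
--             uniq.append(item)
--         prev = item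
--     return [frozenset([item]) for item in uniq]
-- ===== Notes on version B (the rewrite author's own statement) =====
-- stated objective: faster
-- what changed: Replaces A's quadratic build (membership scan of the growing candidate list for every item, then sort) with a single sorted() over all items followed by one adjacent-dedup pass.
import Mathlib
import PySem

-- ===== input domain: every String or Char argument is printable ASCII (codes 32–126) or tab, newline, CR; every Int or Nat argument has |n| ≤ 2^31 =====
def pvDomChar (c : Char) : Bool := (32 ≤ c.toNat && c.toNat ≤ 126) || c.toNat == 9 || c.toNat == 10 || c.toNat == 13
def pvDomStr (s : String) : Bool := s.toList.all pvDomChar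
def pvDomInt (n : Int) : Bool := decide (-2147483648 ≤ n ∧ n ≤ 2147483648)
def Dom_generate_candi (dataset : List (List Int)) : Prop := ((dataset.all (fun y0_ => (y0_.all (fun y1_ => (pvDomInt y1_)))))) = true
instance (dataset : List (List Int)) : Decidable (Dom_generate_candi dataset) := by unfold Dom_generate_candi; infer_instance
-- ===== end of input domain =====

-- B replaces A's membership-scan build of the candidate list with one sorted() over all items
-- followed by a single adjacent-dedup pass (faster).

-- ===== PORT A =====
-- the two nested 'for' loops building cand_1
def candLoop (dataset : List (List Int)) : List (List Int) :=
  dataset.foldl (fun cand_1 transac =>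
    transac.foldl (fun cand_1 item =>
      if [item] ∈ cand_1 then cand_1 else cand_1 ++ [[item]]) cand_1) []

def generate_candi (dataset : List (List Int)) : List (List Int) :=
  (PySem.List.sorted (candLoop dataset) (fun x => x) false).map
    (fun var => PySem.Set.ofList var)

-- ===== PORT B =====
-- the 'for item in items' loop: state (uniq, prev)
def ddLoop (items : List Int) : List Int × Option Int :=
  items.foldl (fun (s : List Int × Option Int) item =>
      ((if s.2 = none ∨ s.2 ≠ some item then s.1 ++ [item] else s.1), some item))
    (([] : List Int), (none : Option Int))

def generate_candi_alt (dataset : List (List Int)) : List (List Int) :=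
  (ddLoop (PySem.List.sorted (dataset.flatMap (fun transac => transac)) (fun x => x) false)).1.map
    (fun item => PySem.Set.ofList [item])

-- ===== PRECONDITION & SPEC =====
def Spec_generate_candi (dataset : List (List Int)) (out : List (List Int)) : Prop := out = generate_candi_alt dataset
instance (dataset : List (List Int)) (out : List (List Int)) : Decidable (Spec_generate_candi dataset out) := by unfold Spec_generate_candi; infer_instance

-- ===== CLAIM (what is proved, stated in full; the proofs are below) =====
def Claim_equal_generate_candi : Prop := ∀ (dataset : List (List Int)), Dom_generate_candi dataset → Spec_generate_candi dataset (generate_candi dataset)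

-- ===== LEMMAS AND PROOFS =====

-- recursive view of B's adjacent-dedup loop
def ddAdj (prev : Option Int) : List Int → List Int
  | [] => []
  | x :: xs => if prev = none ∨ prev ≠ some x then x :: ddAdj (some x) xs else ddAdj (some x) xs

theorem foldl_ddAdj (ys : List Int) (acc : List Int) (prev : Option Int) :
    (ys.foldl (fun (s : List Int × Option Int) item =>
      ((if s.2 = none ∨ s.2 ≠ some item then s.1 ++ [item] else s.1), some item)) (acc, prev)).1
    = acc ++ ddAdj prev ys := by
  induction ys generalizing acc prev with
  | nil => simp [ddAdj]
  | cons x xs ih =>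
    simp only [List.foldl_cons, ddAdj]
    by_cases h : prev = none ∨ prev ≠ some x
    · simp only [if_pos h, ih]; simp
    · simp only [if_neg h, ih]

theorem ddLoop_eq (items : List Int) : (ddLoop items).1 = ddAdj none items := by
  simpa using foldl_ddAdj items [] none

theorem ddAdj_some_spec (ys : List Int) (p : Int)
    (hs : ys.Pairwise (· ≤ ·)) (hlb : ∀ y ∈ ys, p ≤ y) :
    (∀ x ∈ ddAdj (some p) ys, p < x) ∧ (ddAdj (some p) ys).Pairwise (· < ·) ∧
    (∀ x, x ∈ ddAdj (some p) ys ↔ x ∈ ys ∧ x ≠ p) := by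
  induction ys generalizing p with
  | nil => simp [ddAdj]
  | cons x xs ih =>
    have hx := hlb x (by simp)
    have hs' := (List.pairwise_cons.mp hs).2
    have hhd := (List.pairwise_cons.mp hs).1
    by_cases hpx : p = x
    · subst hpx
      have heq : ddAdj (some p) (p :: xs) = ddAdj (some p) xs := by simp [ddAdj]
      have ihp := ih p hs' hhd
      rw [heq]
      refine ⟨ihp.1, ihp.2.1, fun z => ?_⟩
      rw [ihp.2.2 z]
      constructor
      · rintro ⟨hz, hzp⟩; exact ⟨by simp [hz], hzp⟩
      · rintro ⟨hz, hzp⟩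
        rcases List.mem_cons.mp hz with h | h
        · exact absurd h hzp
        · exact ⟨h, hzp⟩
    · have hplt : p < x := lt_of_le_of_ne hx hpx
      have ihx := ih x hs' hhd
      have heq : ddAdj (some p) (x :: xs) = x :: ddAdj (some x) xs := by simp [ddAdj, hpx]
      rw [heq]
      refine ⟨?_, ?_, fun z => ?_⟩
      · intro z hz
        rcases List.mem_cons.mp hz with h | h
        · exact h ▸ hplt
        · exact lt_trans hplt (ihx.1 z h)
      · exact List.pairwise_cons.mpr ⟨fun z hz => ihx.1 z hz, ihx.2.1⟩
      · constructor
        · intro hz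
          rcases List.mem_cons.mp hz with h | h
          · exact ⟨by simp [h], by omega⟩
          · have hzt := (ihx.2.2 z).mp h
            have := hhd z hzt.1
            exact ⟨by simp [hzt.1], by omega⟩
        · rintro ⟨hz, hzp⟩
          rcases List.mem_cons.mp hz with h | h
          · simp [h]
          · by_cases hzx : z = x
            · simp [hzx]
            · exact List.mem_cons.mpr (Or.inr ((ihx.2.2 z).mpr ⟨h, hzx⟩))

theorem ddAdj_none_spec (ys : List Int) (hs : ys.Pairwise (· ≤ ·)) :
    (ddAdj none ys).Pairwise (· < ·) ∧ (∀ x, x ∈ ddAdj none ys ↔ x ∈ ys) := by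
  cases ys with
  | nil => simp [ddAdj]
  | cons x xs =>
    have hs' := (List.pairwise_cons.mp hs).2
    have hhd := (List.pairwise_cons.mp hs).1
    have ihx := ddAdj_some_spec xs x hs' hhd
    have heq : ddAdj none (x :: xs) = x :: ddAdj (some x) xs := by simp [ddAdj]
    rw [heq]
    refine ⟨List.pairwise_cons.mpr ⟨fun z hz => ihx.1 z hz, ihx.2.1⟩, fun z => ?_⟩
    constructor
    · intro hz
      rcases List.mem_cons.mp hz with h | h
      · simp [h]
      · simp [((ihx.2.2 z).mp h).1]
    · intro hz
      rcases List.mem_cons.mp hz with h | h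
      · simp [h]
      · by_cases hzx : z = x
        · simp [hzx]
        · exact List.mem_cons.mpr (Or.inr ((ihx.2.2 z).mpr ⟨h, hzx⟩))

-- Python compares lists lexicographically: core List.lt and Mathlib's lex linear order agree
theorem lt_bridge (a b : List Int) :
    (@LT.lt _ List.instLT a b) ↔ (@LT.lt _ List.instLinearOrder.toLT a b) := by
  show List.lt a b ↔ _
  rw [List.lt_iff_lex_lt]
  exact Iff.rfl

theorem sorted_bridge (xs : List (List Int)) :
    @PySem.List.sorted (List Int) (List Int) List.instLT (fun a b => a.decidableLT b) xs (fun x => x) false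
    = @PySem.List.sorted (List Int) (List Int) List.instLinearOrder.toLT LinearOrder.toDecidableLT xs (fun x => x) false := by
  rw [@PySem.List.sorted_eq_foldl_insertBy (List Int) (List Int) List.instLT (fun a b => a.decidableLT b) xs (fun x => x)]
  rw [@PySem.List.sorted_eq_foldl_insertBy (List Int) (List Int) List.instLinearOrder.toLT LinearOrder.toDecidableLT xs (fun x => x)]
  congr 1
  funext acc x
  congr 1
  funext a b
  exact decide_eq_decide.mpr (lt_bridge a b)

-- A's inner fold over one transaction, on an accumulator of singletons
theorem foldl_dedup_step (xs : List Int) (l : List Int) :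
    xs.foldl (fun cand_1 item =>
        if [item] ∈ cand_1 then cand_1 else cand_1 ++ [[item]]) (l.map (fun x => [x]))
    = (xs.foldl (fun acc x => if x ∈ acc then acc else acc ++ [x]) l).map (fun x => [x]) := by
  induction xs generalizing l with
  | nil => rfl
  | cons x xs ih =>
    simp only [List.foldl_cons]
    have hmem : ([x] ∈ l.map (fun x => [x])) ↔ x ∈ l := by simp
    by_cases h : x ∈ l
    · rw [if_pos (hmem.mpr h), if_pos h, ih]
    · rw [if_neg (fun hc => h (hmem.mp hc)), if_neg h]
      rw [show l.map (fun x => [x]) ++ [[x]] = (l ++ [x]).map (fun x => [x]) by simp]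
      exact ih (l ++ [x])

theorem dedup_eq_foldl (xs : List Int) :
    (xs.foldl (fun acc x => if x ∈ acc then acc else acc ++ [x]) []) = PySem.List.dedup xs := by
  have h : xs.foldl (fun acc x => if x ∈ acc then acc else acc ++ [x]) [] = xs.foldl PySem.Set.add [] := by
    apply List.foldl_ext
    intro b a ha
    by_cases hm : a ∈ b <;> simp [PySem.Set.add, hm]
  rw [h]
  simp [PySem.List.dedup, PySem.Set.ofList, PySem.Set.empty]

-- A's double loop = PySem.List.dedup of the flattened items, wrapped in singletons
theorem candLoop_eq (dataset : List (List Int)) :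
    candLoop dataset = (PySem.List.dedup (dataset.flatMap (fun t => t))).map (fun x => [x]) := by
  have key : ∀ (ds : List (List Int)) (l : List Int),
      ds.foldl (fun cand_1 transac =>
        transac.foldl (fun cand_1 item =>
          if [item] ∈ cand_1 then cand_1 else cand_1 ++ [[item]]) cand_1) (l.map (fun x => [x]))
      = ((ds.flatMap (fun t => t)).foldl (fun acc x => if x ∈ acc then acc else acc ++ [x]) l).map (fun x => [x]) := by
    intro ds
    induction ds with
    | nil => intro l; simp
    | cons t rest ih =>
      intro l
      simp only [List.foldl_cons, List.flatMap_cons, List.foldl_append]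
      rw [foldl_dedup_step t l, ih]
  have h0 := key dataset []
  simp only [List.map_nil] at h0
  rw [candLoop, h0, dedup_eq_foldl]

-- ===== VERDICT (by name: the statement is the Claim_ definition above) =====
theorem generate_candi_spec : Claim_equal_generate_candi := by
  intro dataset _
  unfold Spec_generate_candi generate_candi generate_candi_alt
  rw [candLoop_eq, ddLoop_eq]
  have hSp : (PySem.List.sorted (dataset.flatMap (fun transac => transac)) (fun x => x) false).Pairwise (· ≤ ·) :=
    PySem.List.sorted_pairwise _ (fun x => x)
  have hdd := ddAdj_none_spec _ hSp
  have hperm : (ddAdj none (PySem.List.sorted (dataset.flatMap (fun transac => transac)) (fun x => x) false)).Perm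
      (PySem.List.dedup (dataset.flatMap (fun t => t))) := by
    rw [List.perm_ext_iff_of_nodup (List.Pairwise.imp ne_of_lt hdd.1) (PySem.List.nodup_dedup _)]
    intro a
    rw [hdd.2 a, PySem.List.mem_dedup, PySem.List.mem_sorted]
  have hsorted : @PySem.List.sorted (List Int) (List Int) List.instLinearOrder.toLT LinearOrder.toDecidableLT
      ((PySem.List.dedup (dataset.flatMap (fun t => t))).map (fun x => [x])) (fun x => x) false
      = (ddAdj none (PySem.List.sorted (dataset.flatMap (fun transac => transac)) (fun x => x) false)).map (fun x => [x]) := by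
    exact PySem.List.sorted_eq_of_perm_of_pairwise_lt _ _ (fun x : List Int => x) (hperm.map _)
      (List.pairwise_map.mpr (hdd.1.imp (fun h => List.Lex.rel h)))
  rw [sorted_bridge, hsorted, List.map_map]
  rfl
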